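-- pv_equiv track=rewrite | github.com/bummay/HackerRank | ProblemSolving/RoadsAndLibralies.py | roadsAndLibraries
-- ===== SOURCE A (Python) =====
-- from collections import defaultdict
--
-- def dfs(graph, start):
--     visited, stack = set(), [start]
--     while stack:
--         vertex = stack.pop()
--         if vertex not in visited:
--             visited.add(vertex)
--             stack.extend(graph[vertex] - visited)
--     return visited
--
-- def roadsAndLibraries(n, c_lib, c_road, cities):
--     total_cost = 0
--     if c_road >= c_lib or len(cities) == 0:
--         return n*c_lib
--     else:  # here be real shits
--         city_graph = defaultdict(set)
--
--         connected_cities = set()  # might make this into a set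
--         for i in cities:
--             city_graph[i[0]].add(i[1])
--             city_graph[i[1]].add(i[0])
--             connected_cities.add(i[0])
--             connected_cities.add(i[1])
--
--         isolated_cities = set([i+1 for i in range(n)]) - connected_cities
--
--         while len(connected_cities) > 0:  # have list of all n cities, use dfs, remove cities travelled, add to total sum, then keep doint till empty
--
--             temp = connected_cities.pop()
--             component = dfs(city_graph, temp)
--             total_cost += (len(component)-1)*c_road + c_lib
--             connected_cities -= component
--
--         return total_cost + len(isolated_cities)*c_lib
-- ===== SOURCE B (Python) =====
-- from collections import Counter
--
--
-- def roadsAndLibraries(n, c_lib, c_road, cities):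
--     if c_road >= c_lib or len(cities) == 0:
--         return n * c_lib
--     # label propagation: one pass over the roads, keeping a representative label per city
--     label = {}
--     for road in cities:
--         a, b = road[0], road[1]
--         la = label.setdefault(a, a)
--         lb = label.setdefault(b, b)
--         if la != lb:
--             label = {v: (la if l == lb else l) for v, l in label.items()}
--     sizes = Counter(label.values())
--     total = sum((c - 1) * c_road + c_lib for c in sizes.values())
--     isolated = sum(1 for city in range(1, n + 1) if city not in label)
--     return total + isolated * c_lib
-- ===== Notes on version B (the rewrite author's own statement) =====
-- stated objective: alternative
-- what changed: Replaces the adjacency-set graph plus per-component stack DFS with a single pass over the edge list that maintains a representative label per city (merging two classes by relabelling), reads component sizes off a Counter of the labels, and counts isolated cities as those in 1..n without a label; Pre_ excludes only road rows with fewer than two entries, on which A raises IndexError.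
import Mathlib
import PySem

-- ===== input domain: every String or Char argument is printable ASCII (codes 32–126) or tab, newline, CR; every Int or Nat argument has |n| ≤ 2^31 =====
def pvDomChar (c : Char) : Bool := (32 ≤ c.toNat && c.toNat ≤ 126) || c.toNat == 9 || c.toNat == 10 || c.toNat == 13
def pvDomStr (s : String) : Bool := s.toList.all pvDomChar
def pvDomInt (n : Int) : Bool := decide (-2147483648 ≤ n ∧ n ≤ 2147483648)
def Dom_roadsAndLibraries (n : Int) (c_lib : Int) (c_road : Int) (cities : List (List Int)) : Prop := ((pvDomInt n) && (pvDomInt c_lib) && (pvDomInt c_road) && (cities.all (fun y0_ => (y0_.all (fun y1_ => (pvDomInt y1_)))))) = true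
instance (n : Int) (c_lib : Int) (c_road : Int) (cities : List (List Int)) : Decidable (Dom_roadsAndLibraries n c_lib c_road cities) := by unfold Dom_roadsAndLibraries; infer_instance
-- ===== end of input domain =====

-- B replaces A's adjacency-set graph plus per-component stack DFS by a single pass over the
-- edge list that keeps a representative label per city (merging classes by relabelling),
-- a Counter of the labels for component sizes, and a count of the cities in 1..n that got
-- no label for the isolated ones (objective: alternative algorithm, no speed claim).
-- A's set-iteration orders (set.pop, stack.extend of a set difference) are not observable
-- in the returned total.

-- ===== PORT A =====
-- Python's dfs helper: stack top at the list head; stack.extend of the set difference pushes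
-- those elements (reversed here so pops agree with Python popping from the end). The while
-- loop gets explicit fuel; pvDfs passes a provably sufficient amount (see pvDfs_fuel_ok).
def pvDfsLoop (graph : PySem.Dict Int (PySem.Set Int)) :
    Nat → PySem.Set Int → List Int → PySem.Set Int
  | 0, visited, _ => visited
  | _ + 1, visited, [] => visited
  | fuel + 1, visited, v :: rest =>
    if PySem.Set.contains visited v then
      pvDfsLoop graph fuel visited rest
    else
      let visited' := PySem.Set.add visited v
      pvDfsLoop graph fuel visited'
        ((PySem.Set.diff (graph.getD v PySem.Set.empty) visited').reverse ++ rest)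

def pvDfs (graph : PySem.Dict Int (PySem.Set Int)) (start : Int) : PySem.Set Int :=
  pvDfsLoop graph
    (1 + graph.items.length + (graph.items.map (fun p => p.2.length)).sum)
    PySem.Set.empty [start]


-- A's while-loop over connected_cities (set.pop modelled as taking the head; fuel =
-- the number of cities, enough because every iteration removes at least the popped city).
def pvComponentLoop (graph : PySem.Dict Int (PySem.Set Int)) (c_lib c_road : Int) :
    Nat → PySem.Set Int → Int → Int
  | 0, _, total => total
  | _ + 1, [], total => total
  | fuel + 1, temp :: rest, total =>
    let component := pvDfs graph temp
    pvComponentLoop graph c_lib c_road fuel (PySem.Set.diff rest component)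
      (total + (PySem.Set.len component - 1) * c_road + c_lib)

def roadsAndLibraries (n : Int) (c_lib : Int) (c_road : Int) (cities : List (List Int)) : Int :=
  let total_cost : Int := 0
  if c_lib ≤ c_road ∨ cities = [] then n * c_lib
  else
    let city_graph : PySem.Dict Int (PySem.Set Int) := cities.foldl (fun g i =>
      (g.modify (PySem.List.pyGetD i 0 0) PySem.Set.empty
          (fun s => PySem.Set.add s (PySem.List.pyGetD i 1 0))).modify
        (PySem.List.pyGetD i 1 0) PySem.Set.empty
          (fun s => PySem.Set.add s (PySem.List.pyGetD i 0 0))) PySem.Dict.empty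
    let connected_cities : PySem.Set Int := cities.foldl (fun s i =>
      PySem.Set.add (PySem.Set.add s (PySem.List.pyGetD i 0 0)) (PySem.List.pyGetD i 1 0))
      PySem.Set.empty
    let isolated_cities : PySem.Set Int :=
      PySem.Set.diff (PySem.Set.ofList ((PySem.List.pyRange 0 n 1).map (· + 1))) connected_cities
    pvComponentLoop city_graph c_lib c_road connected_cities.length connected_cities total_cost
      + PySem.Set.len isolated_cities * c_lib


-- ===== PORT B =====
-- one edge of B's label-propagation pass: give both endpoints their existing label
-- (default: themselves), then merge the two classes by relabelling lb-labelled cities to la.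
def pvLabelStep (label : PySem.Dict Int Int) (a b : Int) : PySem.Dict Int Int :=
  let la := (label.get? a).getD a
  let label1 := label.setdefault a a
  let lb := (label1.get? b).getD b
  let label2 := label1.setdefault b b
  if la = lb then label2
  else PySem.Dict.mk (label2.items.map (fun p => (p.1, if p.2 = lb then la else p.2)))

def roadsAndLibraries_alt (n : Int) (c_lib : Int) (c_road : Int) (cities : List (List Int)) : Int :=
  if c_lib ≤ c_road ∨ cities = [] then n * c_lib
  else
    let label : PySem.Dict Int Int := cities.foldl (fun l road =>
      pvLabelStep l (PySem.List.pyGetD road 0 0) (PySem.List.pyGetD road 1 0)) PySem.Dict.empty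
    let sizes := PySem.Dict.counter label.values
    let total := (sizes.values.map (fun c => (c - 1) * c_road + c_lib)).sum
    let isolated : Int :=
      ((PySem.List.pyRange 1 (n + 1) 1).countP (fun city => !(label.contains city)) : Int)
    total + isolated * c_lib

-- ===== PRECONDITION & SPEC =====
-- Pre_ excludes exactly the inputs on which Python A raises an IndexError: a road row with
-- fewer than two entries, reached only when the early return does not fire.
def Pre_roadsAndLibraries (n : Int) (c_lib : Int) (c_road : Int) (cities : List (List Int)) : Prop :=
  c_lib ≤ c_road ∨ cities = [] ∨ ∀ row ∈ cities, 2 ≤ row.length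
instance (n : Int) (c_lib : Int) (c_road : Int) (cities : List (List Int)) : Decidable (Pre_roadsAndLibraries n c_lib c_road cities) := by unfold Pre_roadsAndLibraries; infer_instance

def pvWitness_roadsAndLibraries : Int × Int × Int × List (List Int) := (3, 2, 1, [[1, 2]])

def Spec_roadsAndLibraries (n : Int) (c_lib : Int) (c_road : Int) (cities : List (List Int)) (out : Int) : Prop := out = roadsAndLibraries_alt n c_lib c_road cities
instance (n : Int) (c_lib : Int) (c_road : Int) (cities : List (List Int)) (out : Int) : Decidable (Spec_roadsAndLibraries n c_lib c_road cities out) := by unfold Spec_roadsAndLibraries; infer_instance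

-- ===== CLAIM (what is proved, stated in full; the proofs are below) =====
def Claim_equal_roadsAndLibraries : Prop := ∀ (n : Int) (c_lib : Int) (c_road : Int) (cities : List (List Int)), Dom_roadsAndLibraries n c_lib c_road cities → Pre_roadsAndLibraries n c_lib c_road cities → Spec_roadsAndLibraries n c_lib c_road cities (roadsAndLibraries n c_lib c_road cities)

-- ===== LEMMAS AND PROOFS =====

lemma pvConn_aux (es : List (Int × Int)) :
    ∀ (s : PySem.Set Int) (x : Int),
      x ∈ es.foldl (fun s e => PySem.Set.add (PySem.Set.add s e.1) e.2) s ↔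
        x ∈ s ∨ ∃ e ∈ es, x = e.1 ∨ x = e.2 := by
  induction es with
  | nil => simp [List.foldl]
  | cons e rest ih =>
    intro s x
    simp only [List.foldl_cons, ih, PySem.Set.mem_add, List.mem_cons]
    constructor
    · rintro (((h|h)|h)|⟨e', he', h⟩)
      · exact Or.inl h
      · exact Or.inr ⟨e, Or.inl rfl, Or.inl h⟩
      · exact Or.inr ⟨e, Or.inl rfl, Or.inr h⟩
      · exact Or.inr ⟨e', Or.inr he', h⟩
    · rintro (h|⟨e', (rfl|he'), h⟩)
      · exact Or.inl (Or.inl (Or.inl h))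
      · rcases h with h|h
        · exact Or.inl (Or.inl (Or.inr h))
        · exact Or.inl (Or.inr h)
      · exact Or.inr ⟨e', he', h⟩

lemma pvConn_nodup_aux (es : List (Int × Int)) :
    ∀ (s : PySem.Set Int), s.Nodup →
      (es.foldl (fun s e => PySem.Set.add (PySem.Set.add s e.1) e.2) s).Nodup := by
  induction es with
  | nil => intro s h; simpa [List.foldl]
  | cons e rest ih =>
    intro s h
    exact ih _ (PySem.Set.nodup_add _ _ (PySem.Set.nodup_add _ _ h))

lemma pvKeysModify (d : PySem.Dict Int (PySem.Set Int)) (k : Int) (f : PySem.Set Int → PySem.Set Int) :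
    (d.modify k PySem.Set.empty f).keys = PySem.Set.add d.keys k := by
  rw [PySem.Dict.keys_modify]
  by_cases h : d.contains k = true
  · rw [PySem.Dict.keys_insert_of_contains _ _ h, PySem.Set.add_of_mem]
    exact (PySem.Dict.contains_iff_mem_keys _ _).1 h
  · rw [PySem.Dict.keys_insert_of_not_contains _ _ (by simpa using h),
      PySem.Set.add_of_not_mem]
    intro hm
    exact h ((PySem.Dict.contains_iff_mem_keys _ _).2 hm)

def gstep (g : PySem.Dict Int (PySem.Set Int)) (e : Int × Int) : PySem.Dict Int (PySem.Set Int) :=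
  (g.modify e.1 PySem.Set.empty (fun s => PySem.Set.add s e.2)).modify
    e.2 PySem.Set.empty (fun s => PySem.Set.add s e.1)

lemma pvGraph_keys_aux (es : List (Int × Int)) :
    ∀ (g : PySem.Dict Int (PySem.Set Int)),
      (es.foldl gstep g).keys =
        es.foldl (fun s e => PySem.Set.add (PySem.Set.add s e.1) e.2) g.keys := by
  induction es with
  | nil => intro g; simp [List.foldl]
  | cons e rest ih =>
    intro g
    simp only [List.foldl_cons, ih, gstep, pvKeysModify]

lemma pvGraph_mem_aux (es : List (Int × Int)) :
    ∀ (g : PySem.Dict Int (PySem.Set Int)) (v y : Int),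
      y ∈ (es.foldl gstep g).getD v PySem.Set.empty ↔
        y ∈ g.getD v PySem.Set.empty ∨ (v, y) ∈ es ∨ (y, v) ∈ es := by
  induction es with
  | nil => intro g v y; simp [List.foldl]
  | cons e rest ih =>
    intro g v y
    simp only [List.foldl_cons, ih, gstep, List.mem_cons]
    simp only [PySem.Dict.getD_modify]
    split_ifs with h2 h1 h1 <;>
      simp_all [PySem.Set.mem_add, Prod.ext_iff] <;> tauto

def pvReach (es : List (Int × Int)) (x y : Int) : Prop :=
  Relation.EqvGen (fun u w => (u, w) ∈ es) x y

def pvConnF (es : List (Int × Int)) : PySem.Set Int :=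
  es.foldl (fun s e => PySem.Set.add (PySem.Set.add s e.1) e.2) PySem.Set.empty

lemma pvReach_refl (es : List (Int × Int)) (x : Int) : pvReach es x x :=
  Relation.EqvGen.refl x

lemma pvReach_symm {es : List (Int × Int)} {x y : Int} (h : pvReach es x y) : pvReach es y x :=
  Relation.EqvGen.symm _ _ h

lemma pvReach_trans {es : List (Int × Int)} {x y z : Int}
    (h1 : pvReach es x y) (h2 : pvReach es y z) : pvReach es x z :=
  Relation.EqvGen.trans _ _ _ h1 h2

lemma pvReach_mono {es : List (Int × Int)} (e : Int × Int) {x y : Int}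
    (h : pvReach es x y) : pvReach (es ++ [e]) x y := by
  refine Relation.EqvGen.mono (fun a b hab => ?_) h
  exact List.mem_append_left _ hab

lemma pvMem_pvConnF (es : List (Int × Int)) (x : Int) :
    x ∈ pvConnF es ↔ ∃ e ∈ es, x = e.1 ∨ x = e.2 := by
  rw [pvConnF, pvConn_aux]
  simp [PySem.Set.empty]

lemma pvReach_support {es : List (Int × Int)} {x y : Int} (h : pvReach es x y) :
    x = y ∨ (x ∈ pvConnF es ∧ y ∈ pvConnF es) := by
  induction h with
  | rel a b hab =>
    right
    exact ⟨(pvMem_pvConnF es a).2 ⟨(a, b), hab, Or.inl rfl⟩,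
      (pvMem_pvConnF es b).2 ⟨(a, b), hab, Or.inr rfl⟩⟩
  | refl a => exact Or.inl rfl
  | symm a b _ ih => tauto
  | trans a b c _ _ ih1 ih2 =>
    rcases ih1 with rfl | ⟨h1, h2⟩
    · exact ih2
    · rcases ih2 with rfl | ⟨h3, h4⟩
      · exact Or.inr ⟨h1, h2⟩
      · exact Or.inr ⟨h1, h4⟩

lemma pvReach_append (es : List (Int × Int)) (e : Int × Int) (x y : Int) :
    pvReach (es ++ [e]) x y ↔
      pvReach es x y ∨ (pvReach es x e.1 ∧ pvReach es e.2 y) ∨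
        (pvReach es x e.2 ∧ pvReach es e.1 y) := by
  have hedge : pvReach (es ++ [e]) e.1 e.2 :=
    Relation.EqvGen.rel _ _ (List.mem_append_right _ (by simp))
  have mono : ∀ {u w}, pvReach es u w → pvReach (es ++ [e]) u w := fun h =>
    Relation.EqvGen.mono (fun a b hab => List.mem_append_left _ hab) h
  constructor
  · intro h
    induction h with
    | rel a b hab =>
      rcases List.mem_append.1 hab with h | h
      · exact Or.inl (Relation.EqvGen.rel _ _ h)
      · simp only [List.mem_singleton] at h
        subst h
        exact Or.inr (Or.inl ⟨Relation.EqvGen.refl _, Relation.EqvGen.refl _⟩)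
    | refl a => exact Or.inl (Relation.EqvGen.refl _)
    | symm a b _ ih =>
      rcases ih with h | ⟨h1, h2⟩ | ⟨h1, h2⟩
      · exact Or.inl (Relation.EqvGen.symm _ _ h)
      · exact Or.inr (Or.inr ⟨Relation.EqvGen.symm _ _ h2, Relation.EqvGen.symm _ _ h1⟩)
      · exact Or.inr (Or.inl ⟨Relation.EqvGen.symm _ _ h2, Relation.EqvGen.symm _ _ h1⟩)
    | trans a b c _ _ ih1 ih2 =>
      have tr : ∀ {u v w}, pvReach es u v → pvReach es v w → pvReach es u w :=
        fun h1 h2 => Relation.EqvGen.trans _ _ _ h1 h2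
      rcases ih1 with h | ⟨h1, h2⟩ | ⟨h1, h2⟩ <;>
        rcases ih2 with h' | ⟨h3, h4⟩ | ⟨h3, h4⟩
      · exact Or.inl (tr h h')
      · exact Or.inr (Or.inl ⟨tr h h3, h4⟩)
      · exact Or.inr (Or.inr ⟨tr h h3, h4⟩)
      · exact Or.inr (Or.inl ⟨h1, tr h2 h'⟩)
      · exact Or.inr (Or.inl ⟨h1, h4⟩)
      · exact Or.inl (tr h1 h4)
      · exact Or.inr (Or.inr ⟨h1, tr h2 h'⟩)
      · exact Or.inl (tr h1 h4)
      · exact Or.inr (Or.inr ⟨h1, h4⟩)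
  · rintro (h | ⟨h1, h2⟩ | ⟨h1, h2⟩)
    · exact mono h
    · exact Relation.EqvGen.trans _ _ _ (Relation.EqvGen.trans _ _ _ (mono h1) hedge) (mono h2)
    · exact Relation.EqvGen.trans _ _ _
        (Relation.EqvGen.trans _ _ _ (mono h1) (Relation.EqvGen.symm _ _ hedge)) (mono h2)

def pvPhi (g : PySem.Dict Int (PySem.Set Int)) (vis : PySem.Set Int) (st : List Int) : Nat :=
  st.length +
    ((g.keys.filter (fun v => !(PySem.Set.contains vis v))).map
      (fun v => 1 + (g.getD v PySem.Set.empty).length)).sum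

lemma pvSum_filter_ne {l : List Int} (w : Int → Nat) {v : Int} (hv : v ∈ l) :
    ((l.filter (fun x => !(x == v))).map w).sum + w v ≤ (l.map w).sum := by
  induction l with
  | nil => cases hv
  | cons a l ih =>
    by_cases ha : a = v
    · subst ha
      have h1 : ((l.filter (fun x => !(x == a))).map w).sum ≤ (l.map w).sum := by
        have hs := List.filter_sublist (p := fun x => !(x == a)) (l := l)
        exact (hs.map w).sum_le_sum (by simp)
      simp only [List.filter_cons, beq_self_eq_true, Bool.not_true, List.map_cons, List.sum_cons]
      rw [if_neg (by simp)]
      omega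
    · have hv' : v ∈ l := by
        rcases List.mem_cons.1 hv with rfl | h
        · exact absurd rfl ha
        · exact h
      have h2 := ih hv'
      simp only [List.filter_cons]
      rw [if_pos (by simpa using ha)]
      simp only [List.map_cons, List.sum_cons]
      omega

lemma pvPhi_unvisited (g : PySem.Dict Int (PySem.Set Int)) (vis : PySem.Set Int) (v : Int)
    (rest : List Int) (hv : ¬ v ∈ vis) :
    pvPhi g (PySem.Set.add vis v)
        ((PySem.Set.diff (g.getD v PySem.Set.empty) (PySem.Set.add vis v)).reverse ++ rest) + 1 ≤
      pvPhi g vis (v :: rest) := by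
  classical
  have hK' : g.keys.filter (fun x => !(PySem.Set.contains (PySem.Set.add vis v) x)) =
      (g.keys.filter (fun x => !(PySem.Set.contains vis x))).filter (fun x => !(x == v)) := by
    rw [List.filter_filter]
    refine List.filter_congr ?_
    intro x _
    by_cases hxv : x = v <;> by_cases hxs : x ∈ vis <;>
      simp [PySem.Set.mem_add, hxv, hxs]
  have hpush : (PySem.Set.diff (g.getD v PySem.Set.empty) (PySem.Set.add vis v)).length ≤
      (g.getD v PySem.Set.empty).length := List.length_filter_le _ _
  by_cases hk : v ∈ g.keys
  · have hvK : v ∈ g.keys.filter (fun x => !(PySem.Set.contains vis x)) := by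
      refine List.mem_filter.2 ⟨hk, ?_⟩
      simp [hv]
    have hsum := pvSum_filter_ne (fun x => 1 + (g.getD x PySem.Set.empty).length) hvK
    simp only at hsum
    simp only [pvPhi, hK', List.length_append, List.length_reverse, List.length_cons]
    omega
  · have hcon : g.contains v = false := by
      rw [← Bool.not_eq_true]
      intro hc
      exact hk ((PySem.Dict.contains_iff_mem_keys _ _).1 hc)
    have hget : g.getD v PySem.Set.empty = PySem.Set.empty :=
      PySem.Dict.getD_of_not_contains _ _ hcon
    have hKeq : g.keys.filter (fun x => !(PySem.Set.contains (PySem.Set.add vis v) x)) =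
        g.keys.filter (fun x => !(PySem.Set.contains vis x)) := by
      refine List.filter_congr ?_
      intro x hx
      have hxv : x ≠ v := fun h => hk (h ▸ hx)
      by_cases hxs : x ∈ vis <;>
        simp [PySem.Set.mem_add, hxv, hxs]
    simp only [pvPhi, hKeq, hget, List.length_append, List.length_reverse, List.length_cons]
    simp [PySem.Set.diff, PySem.Set.empty]
lemma pvDfsLoop_spec (g : PySem.Dict Int (PySem.Set Int)) :
    ∀ (fuel : Nat) (vis : PySem.Set Int) (st : List Int),
      vis.Nodup →
      pvPhi g vis st ≤ fuel →
      (∀ v ∈ vis, ∀ y ∈ g.getD v PySem.Set.empty, y ∈ vis ∨ y ∈ st) →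
      (pvDfsLoop g fuel vis st).Nodup ∧
      (∀ x ∈ vis, x ∈ pvDfsLoop g fuel vis st) ∧
      (∀ s ∈ st, s ∈ pvDfsLoop g fuel vis st) ∧
      (∀ v ∈ pvDfsLoop g fuel vis st, ∀ y ∈ g.getD v PySem.Set.empty,
        y ∈ pvDfsLoop g fuel vis st) ∧
      (∀ x ∈ pvDfsLoop g fuel vis st, x ∈ vis ∨ ∃ s ∈ st,
        Relation.ReflTransGen (fun u w => w ∈ g.getD u PySem.Set.empty) s x) := by
  intro fuel
  induction fuel with
  | zero =>
    intro vis st hnd hfuel hinv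
    have hst : st = [] := by
      have := Nat.le_of_lt_succ (Nat.lt_succ_of_le hfuel)
      have h1 : st.length = 0 := by
        have : st.length ≤ pvPhi g vis st := Nat.le_add_right _ _
        omega
      exact List.eq_nil_of_length_eq_zero h1
    subst hst
    simp only [pvDfsLoop]
    refine ⟨hnd, fun x hx => hx, by simp, ?_, fun x hx => Or.inl hx⟩
    intro v hv y hy
    rcases hinv v hv y hy with h | h
    · exact h
    · cases h
  | succ fuel ih =>
    intro vis st hnd hfuel hinv
    match st with
    | [] =>
      simp only [pvDfsLoop]
      refine ⟨hnd, fun x hx => hx, by simp, ?_, fun x hx => Or.inl hx⟩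
      intro v hv y hy
      rcases hinv v hv y hy with h | h
      · exact h
      · cases h
    | v :: rest =>
      by_cases hv : PySem.Set.contains vis v = true
      · have hvmem : v ∈ vis := (PySem.Set.contains_iff _ _).1 hv
        have heq : pvDfsLoop g (fuel + 1) vis (v :: rest) = pvDfsLoop g fuel vis rest := by
          simp only [pvDfsLoop]
          rw [if_pos hv]
        rw [heq]
        have hfuel' : pvPhi g vis rest ≤ fuel := by
          have : pvPhi g vis (v :: rest) = pvPhi g vis rest + 1 := by
            simp [pvPhi, List.length_cons]; omega
          omega
        have hinv' : ∀ w ∈ vis, ∀ y ∈ g.getD w PySem.Set.empty, y ∈ vis ∨ y ∈ rest := by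
          intro w hw y hy
          rcases hinv w hw y hy with h | h
          · exact Or.inl h
          · rcases List.mem_cons.1 h with rfl | h
            · exact Or.inl hvmem
            · exact Or.inr h
        obtain ⟨c1, c2, c3, c4, c5⟩ := ih vis rest hnd hfuel' hinv'
        refine ⟨c1, c2, fun s hs => ?_, c4, fun x hx => ?_⟩
        · rcases List.mem_cons.1 hs with rfl | hs
          · exact c2 _ hvmem
          · exact c3 _ hs
        · rcases c5 x hx with h | ⟨s, hs, h⟩
          · exact Or.inl h
          · exact Or.inr ⟨s, List.mem_cons_of_mem _ hs, h⟩
      · have hvnot : v ∉ vis := fun h => hv ((PySem.Set.contains_iff _ _).2 h)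
        have heq : pvDfsLoop g (fuel + 1) vis (v :: rest) =
            pvDfsLoop g fuel (PySem.Set.add vis v)
              ((PySem.Set.diff (g.getD v PySem.Set.empty) (PySem.Set.add vis v)).reverse ++ rest) := by
          simp only [pvDfsLoop]
          rw [if_neg hv]
        rw [heq]
        set vis' := PySem.Set.add vis v with hvis'
        set st' := (PySem.Set.diff (g.getD v PySem.Set.empty) vis').reverse ++ rest with hst'
        have hnd' : vis'.Nodup := PySem.Set.nodup_add _ _ hnd
        have hfuel' : pvPhi g vis' st' ≤ fuel := by
          have hstep := pvPhi_unvisited g vis v rest hvnot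
          rw [← hvis'] at hstep
          rw [← hst'] at hstep
          omega
        have hinv' : ∀ w ∈ vis', ∀ y ∈ g.getD w PySem.Set.empty, y ∈ vis' ∨ y ∈ st' := by
          intro w hw y hy
          rcases (PySem.Set.mem_add _ _ _).1 hw with hw | rfl
          · rcases hinv w hw y hy with h | h
            · exact Or.inl ((PySem.Set.mem_add _ _ _).2 (Or.inl h))
            · rcases List.mem_cons.1 h with rfl | h
              · exact Or.inl ((PySem.Set.mem_add _ _ _).2 (Or.inr rfl))
              · exact Or.inr (List.mem_append_right _ h)
          · by_cases hyv : y ∈ vis'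
            · exact Or.inl hyv
            · refine Or.inr (List.mem_append_left _ ?_)
              rw [List.mem_reverse]
              exact (PySem.Set.mem_diff _ _ _).2 ⟨hy, hyv⟩
        obtain ⟨c1, c2, c3, c4, c5⟩ := ih vis' st' hnd' hfuel' hinv'
        have hvin : v ∈ pvDfsLoop g fuel vis' st' :=
          c2 _ ((PySem.Set.mem_add _ _ _).2 (Or.inr rfl))
        refine ⟨c1, fun x hx => c2 _ ((PySem.Set.mem_add _ _ _).2 (Or.inl hx)),
          fun s hs => ?_, c4, fun x hx => ?_⟩
        · rcases List.mem_cons.1 hs with rfl | hs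
          · exact hvin
          · exact c3 _ (List.mem_append_right _ hs)
        · rcases c5 x hx with h | ⟨s, hs, h⟩
          · rcases (PySem.Set.mem_add _ _ _).1 h with h | rfl
            · exact Or.inl h
            · exact Or.inr ⟨x, List.mem_cons_self, Relation.ReflTransGen.refl⟩
          · rcases List.mem_append.1 hs with hs | hs
            · rw [List.mem_reverse] at hs
              have hsnb : s ∈ g.getD v PySem.Set.empty := ((PySem.Set.mem_diff _ _ _).1 hs).1
              refine Or.inr ⟨v, List.mem_cons_self, ?_⟩
              exact Relation.ReflTransGen.trans (Relation.ReflTransGen.single hsnb) h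
            · exact Or.inr ⟨s, List.mem_cons_of_mem _ hs, h⟩

def pvGraphF (es : List (Int × Int)) : PySem.Dict Int (PySem.Set Int) :=
  es.foldl (fun g e =>
    (g.modify e.1 PySem.Set.empty (fun s => PySem.Set.add s e.2)).modify
      e.2 PySem.Set.empty (fun s => PySem.Set.add s e.1)) PySem.Dict.empty

lemma pvGraphF_eq_foldl (es : List (Int × Int)) : pvGraphF es = es.foldl gstep PySem.Dict.empty := rfl

lemma pvMem_getD_pvGraphF (es : List (Int × Int)) (v y : Int) :
    y ∈ (pvGraphF es).getD v PySem.Set.empty ↔ (v, y) ∈ es ∨ (y, v) ∈ es := by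
  rw [pvGraphF_eq_foldl, pvGraph_mem_aux]
  simp [PySem.Dict.getD_empty, PySem.Set.empty]

lemma pvKeys_pvGraphF (es : List (Int × Int)) : (pvGraphF es).keys = pvConnF es := by
  rw [pvGraphF_eq_foldl, pvGraph_keys_aux, pvConnF]
  simp [PySem.Dict.keys_empty, PySem.Set.empty]

lemma pvSum_map_one_add (l : List Int) (w : Int → Nat) :
    (l.map (fun v => 1 + w v)).sum = l.length + (l.map w).sum := by
  induction l with
  | nil => simp
  | cons a l ih => simp [ih]; omega

lemma pvNodup_pvConnF (es : List (Int × Int)) : (pvConnF es).Nodup :=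
  pvConn_nodup_aux es _ List.nodup_nil

lemma pvNodup_keys_pvGraphF (es : List (Int × Int)) : (pvGraphF es).keys.Nodup := by
  rw [pvKeys_pvGraphF]
  exact pvNodup_pvConnF es

lemma pvDfs_fuel_ok (es : List (Int × Int)) (s0 : Int) :
    pvPhi (pvGraphF es) PySem.Set.empty [s0] ≤
      1 + (pvGraphF es).items.length + ((pvGraphF es).items.map (fun p => p.2.length)).sum := by
  set g := pvGraphF es with hg
  have hfil : g.keys.filter (fun v => !(PySem.Set.contains PySem.Set.empty v)) = g.keys := by
    refine List.filter_eq_self.2 ?_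
    intro x _
    simp [PySem.Set.empty]
  have hlen : g.keys.length = g.items.length := by
    simp only [PySem.Dict.keys, List.length_map]
  have hmap : (g.keys.map (fun v => (g.getD v PySem.Set.empty).length)).sum =
      (g.items.map (fun p => p.2.length)).sum := by
    simp only [PySem.Dict.keys, List.map_map]
    refine congrArg List.sum (List.map_congr_left ?_)
    intro p hp
    have : g.getD p.1 PySem.Set.empty = p.2 :=
      PySem.Dict.getD_of_mem_items _ (by simpa using hp) (pvNodup_keys_pvGraphF es) _
    simpa [Function.comp] using congrArg List.length this
  simp only [pvPhi, hfil, List.length_cons, List.length_nil]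
  rw [pvSum_map_one_add, hlen, hmap]
  omega

lemma pvDfs_spec (es : List (Int × Int)) (s : Int) :
    (pvDfs (pvGraphF es) s).Nodup ∧
    (∀ x, x ∈ pvDfs (pvGraphF es) s ↔ pvReach es s x) := by
  obtain ⟨c1, c2, c3, c4, c5⟩ :=
    pvDfsLoop_spec (pvGraphF es)
      (1 + (pvGraphF es).items.length + ((pvGraphF es).items.map (fun p => p.2.length)).sum)
      PySem.Set.empty [s] List.nodup_nil (pvDfs_fuel_ok es s) (by intro v hv; cases hv)
  have hR : pvDfs (pvGraphF es) s =
      pvDfsLoop (pvGraphF es)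
        (1 + (pvGraphF es).items.length + ((pvGraphF es).items.map (fun p => p.2.length)).sum)
        PySem.Set.empty [s] := rfl
  rw [hR]
  refine ⟨c1, fun x => ⟨fun hx => ?_, fun hx => ?_⟩⟩
  · rcases c5 x hx with h | ⟨t, ht, h⟩
    · cases h
    · rcases List.mem_singleton.1 ht with rfl
      clear hx
      induction h with
      | refl => exact Relation.EqvGen.refl _
      | tail hstep hnb ih =>
        rename_i b c
        rcases (pvMem_getD_pvGraphF es b c).1 hnb with h' | h'
        · exact Relation.EqvGen.trans _ _ _ ih (Relation.EqvGen.rel _ _ h')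
        · exact Relation.EqvGen.trans _ _ _ ih (Relation.EqvGen.symm _ _ (Relation.EqvGen.rel _ _ h'))
  · have hs : s ∈ pvDfsLoop (pvGraphF es) _ PySem.Set.empty [s] := c3 s (List.mem_singleton.2 rfl)
    have key : ∀ a b, pvReach es a b →
        (a ∈ pvDfsLoop (pvGraphF es)
          (1 + (pvGraphF es).items.length + ((pvGraphF es).items.map (fun p => p.2.length)).sum)
          PySem.Set.empty [s] ↔
         b ∈ pvDfsLoop (pvGraphF es)
          (1 + (pvGraphF es).items.length + ((pvGraphF es).items.map (fun p => p.2.length)).sum)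
          PySem.Set.empty [s]) := by
      intro a b hab
      induction hab with
      | rel a b hab =>
        constructor
        · intro ha
          exact c4 a ha b ((pvMem_getD_pvGraphF es a b).2 (Or.inl hab))
        · intro hb
          exact c4 b hb a ((pvMem_getD_pvGraphF es b a).2 (Or.inr hab))
      | refl a => exact Iff.rfl
      | symm a b _ ih => exact ih.symm
      | trans a b c _ _ ih1 ih2 => exact ih1.trans ih2
    exact (key s x hx).1 hs

def pvLabF (es : List (Int × Int)) : PySem.Dict Int Int :=
  es.foldl (fun l e => pvLabelStep l e.1 e.2) PySem.Dict.empty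

def pvGood (es : List (Int × Int)) (C : PySem.Set Int) (L : PySem.Dict Int Int) : Prop :=
  L.keys = C ∧
  (∀ x lx, L.get? x = some lx → pvReach es x lx) ∧
  (∀ x y lx ly, L.get? x = some lx → L.get? y = some ly → (pvReach es x y ↔ lx = ly))

lemma pvGet?_mk_map_snd (l : List (Int × Int)) (h : Int → Int) (x : Int) :
    (PySem.Dict.mk (l.map (fun p => (p.1, h p.2)))).get? x =
      ((PySem.Dict.mk l).get? x).map h := by
  induction l with
  | nil => simp [PySem.Dict.get?]
  | cons p rest ih =>
    rw [List.map_cons]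
    rcases p with ⟨k, v⟩
    rw [PySem.Dict.get?_mk_cons, PySem.Dict.get?_mk_cons]
    by_cases hk : (k == x) = true
    · simp [hk]
    · simp only [hk]
      simpa using ih

lemma pvKeys_mk_map_snd (l : List (Int × Int)) (h : Int → Int) :
    (PySem.Dict.mk (l.map (fun p => (p.1, h p.2)))).keys = (PySem.Dict.mk l).keys := by
  simp [PySem.Dict.keys, List.map_map, Function.comp]

lemma pvGood_setdefault (es : List (Int × Int)) (C : PySem.Set Int) (L : PySem.Dict Int Int)
    (a : Int) (hsub : ∀ x ∈ pvConnF es, x ∈ C) (hg : pvGood es C L) :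
    pvGood es (PySem.Set.add C a) (L.setdefault a a) := by
  obtain ⟨hk, h2, h3⟩ := hg
  by_cases hac : L.contains a = true
  · have ha : a ∈ C := hk ▸ (PySem.Dict.contains_iff_mem_keys _ _).1 hac
    rw [PySem.Dict.setdefault_of_contains _ _ hac, PySem.Set.add_of_mem ha]
    exact ⟨hk, h2, h3⟩
  · have hacf : L.contains a = false := by simpa using hac
    have hanC : a ∉ C := by
      intro h
      exact hac ((PySem.Dict.contains_iff_mem_keys _ _).2 (hk ▸ h))
    have hanconn : a ∉ pvConnF es := fun h => hanC (hsub a h)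
    have hreach_a : ∀ y, pvReach es a y → y = a := by
      intro y hy
      rcases pvReach_support hy with h | ⟨h1, _⟩
      · exact h.symm
      · exact absurd h1 hanconn
    have hget : ∀ x, (L.setdefault a a).get? x = if x = a then some a else L.get? x := by
      intro x
      by_cases hx : x = a
      · subst hx
        rw [PySem.Dict.get?_setdefault_self, if_pos rfl,
          (PySem.Dict.get?_eq_none_iff_contains _ _).2 hacf]
        rfl
      · rw [PySem.Dict.get?_setdefault_of_ne _ _ hx, if_neg hx]
    refine ⟨?_, ?_, ?_⟩
    · rw [PySem.Dict.keys_setdefault, if_neg (by simp [hacf]), hk,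
        PySem.Set.add_of_not_mem hanC]
    · intro x lx hx
      rw [hget] at hx
      by_cases hxa : x = a
      · rw [if_pos hxa] at hx
        cases hx
        subst hxa
        exact pvReach_refl es x
      · rw [if_neg hxa] at hx
        exact h2 x lx hx
    · intro x y lx ly hx hy
      rw [hget] at hx hy
      by_cases hxa : x = a <;> by_cases hya : y = a
      · rw [if_pos hxa] at hx
        rw [if_pos hya] at hy
        have hlx := (Option.some.inj hx).symm
        have hly := (Option.some.inj hy).symm
        rw [hlx, hly, hxa, hya]
        simpa using pvReach_refl es a
      · rw [if_pos hxa] at hx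
        rw [if_neg hya] at hy
        have hlx := (Option.some.inj hx).symm
        subst hxa
        constructor
        · intro h
          exact absurd (hreach_a y h) hya
        · intro h
          rw [hlx] at h
          rw [← h] at hy
          exact absurd (hreach_a y (pvReach_symm (h2 y x hy))) hya
      · rw [if_neg hxa] at hx
        rw [if_pos hya] at hy
        have hly := (Option.some.inj hy).symm
        subst hya
        constructor
        · intro h
          exact absurd (hreach_a x (pvReach_symm h)) hxa
        · intro h
          rw [hly] at h
          rw [h] at hx
          exact absurd (hreach_a x (pvReach_symm (h2 x y hx))) hxa
      · rw [if_neg hxa] at hx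
        rw [if_neg hya] at hy
        exact h3 x y lx ly hx hy

def pvMerge (la lb l : Int) : Int := if l = lb then la else l

lemma pvMerge_eq_iff (la lb u v : Int) :
    pvMerge la lb u = pvMerge la lb v ↔
      (u = v ∨ (u = la ∧ v = lb) ∨ (u = lb ∧ v = la)) := by
  unfold pvMerge
  split_ifs <;> omega

lemma pvConnF_append (es : List (Int × Int)) (e : Int × Int) :
    pvConnF (es ++ [e]) = PySem.Set.add (PySem.Set.add (pvConnF es) e.1) e.2 := by
  simp [pvConnF, List.foldl_append]

lemma pvGood_step (es : List (Int × Int)) (e : Int × Int) (L : PySem.Dict Int Int)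
    (hg : pvGood es (pvConnF es) L) :
    pvGood (es ++ [e]) (pvConnF (es ++ [e])) (pvLabelStep L e.1 e.2) := by
  obtain ⟨a, b⟩ := e
  simp only at *
  set la := (L.get? a).getD a with hla
  set L1 := L.setdefault a a with hL1
  set lb := (L1.get? b).getD b with hlb
  set L2 := L1.setdefault b b with hL2
  have g2 : pvGood es (PySem.Set.add (PySem.Set.add (pvConnF es) a) b) L2 :=
    pvGood_setdefault es _ L1 b
      (fun x h => (PySem.Set.mem_add _ _ _).2 (Or.inl h))
      (pvGood_setdefault es _ L a (fun x h => h) hg)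
  obtain ⟨g2k, g2r, g2iff⟩ := g2
  have hLb : L2.get? b = some lb := by
    rw [hL2, PySem.Dict.get?_setdefault_self, ← hlb]
  have hL1a : L1.get? a = some la := by
    rw [hL1, PySem.Dict.get?_setdefault_self, ← hla]
  have hLa : L2.get? a = some la := by
    by_cases hab : a = b
    · subst hab
      rw [hLb, hlb, hL1a]
      rfl
    · rw [hL2, PySem.Dict.get?_setdefault_of_ne _ _ hab, hL1a]
  have hstep : pvLabelStep L a b =
      (if la = lb then L2
       else PySem.Dict.mk (L2.items.map (fun p => (p.1, if p.2 = lb then la else p.2)))) := by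
    rw [pvLabelStep]
  have hmapget : ∀ x, (pvLabelStep L a b).get? x = (L2.get? x).map (pvMerge la lb) := by
    intro x
    rw [hstep]
    by_cases hl : la = lb
    · rw [if_pos hl]
      cases hx : L2.get? x with
      | none => simp
      | some l2 =>
        simp only [Option.map_some]
        by_cases hcase : l2 = lb
        · rw [show pvMerge la lb l2 = la by simp [pvMerge, hcase], hl, hcase]
        · rw [show pvMerge la lb l2 = l2 by simp [pvMerge, hcase]]
    · rw [if_neg hl]
      have hmk : PySem.Dict.mk L2.items = L2 := rfl
      have := pvGet?_mk_map_snd L2.items (fun l => if l = lb then la else l) x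
      rw [hmk] at this
      simpa [pvMerge] using this
  have hkeys : (pvLabelStep L a b).keys = L2.keys := by
    rw [hstep]
    by_cases hl : la = lb
    · rw [if_pos hl]
    · rw [if_neg hl]
      have hmk : PySem.Dict.mk L2.items = L2 := rfl
      have := pvKeys_mk_map_snd L2.items (fun l => if l = lb then la else l)
      rw [hmk] at this
      exact this
  have hedge : pvReach (es ++ [(a, b)]) a b :=
    Relation.EqvGen.rel _ _ (List.mem_append_right _ (by simp))
  refine ⟨?_, ?_, ?_⟩
  · rw [hkeys, g2k, pvConnF_append]
  · intro x lx hx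
    rw [hmapget] at hx
    cases hl2 : L2.get? x with
    | none => rw [hl2] at hx; cases hx
    | some l2 =>
      rw [hl2] at hx
      simp only [Option.map_some] at hx
      obtain rfl := Option.some.inj hx
      by_cases hcase : l2 = lb
      · have e1 : pvMerge la lb l2 = la := by simp [pvMerge, hcase]
        rw [e1]
        have t1 : pvReach es x b :=
          pvReach_trans (hcase ▸ g2r x l2 hl2) (pvReach_symm (g2r b lb hLb))
        have t2 : pvReach es a la := g2r a la hLa
        exact pvReach_trans (pvReach_mono _ t1)
          (pvReach_trans (pvReach_symm hedge) (pvReach_mono _ t2))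
      · have e1 : pvMerge la lb l2 = l2 := by simp [pvMerge, hcase]
        rw [e1]
        exact pvReach_mono _ (g2r x l2 hl2)
  · intro x y lx ly hx hy
    rw [hmapget] at hx hy
    cases hl2x : L2.get? x with
    | none => rw [hl2x] at hx; cases hx
    | some l2x =>
      cases hl2y : L2.get? y with
      | none => rw [hl2y] at hy; cases hy
      | some l2y =>
        rw [hl2x] at hx
        rw [hl2y] at hy
        simp only [Option.map_some] at hx hy
        obtain rfl := Option.some.inj hx
        obtain rfl := Option.some.inj hy
        rw [pvReach_append, pvMerge_eq_iff]
        constructor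
        · rintro (hxy | ⟨h1, h2⟩ | ⟨h1, h2⟩)
          · exact Or.inl ((g2iff x y l2x l2y hl2x hl2y).1 hxy)
          · exact Or.inr (Or.inl ⟨(g2iff x a l2x la hl2x hLa).1 h1,
              (g2iff y b l2y lb hl2y hLb).1 (pvReach_symm h2)⟩)
          · exact Or.inr (Or.inr ⟨(g2iff x b l2x lb hl2x hLb).1 h1,
              (g2iff y a l2y la hl2y hLa).1 (pvReach_symm h2)⟩)
        · rintro (hq | ⟨h1, h2⟩ | ⟨h1, h2⟩)
          · exact Or.inl ((g2iff x y l2x l2y hl2x hl2y).2 hq)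
          · exact Or.inr (Or.inl ⟨(g2iff x a l2x la hl2x hLa).2 h1,
              pvReach_symm ((g2iff y b l2y lb hl2y hLb).2 h2)⟩)
          · exact Or.inr (Or.inr ⟨(g2iff x b l2x lb hl2x hLb).2 h1,
              pvReach_symm ((g2iff y a l2y la hl2y hLa).2 h2)⟩)

lemma pvLabF_append (es : List (Int × Int)) (e : Int × Int) :
    pvLabF (es ++ [e]) = pvLabelStep (pvLabF es) e.1 e.2 := by
  rw [pvLabF, pvLabF, List.foldl_append]
  rfl

lemma pvLabF_good (es : List (Int × Int)) : pvGood es (pvConnF es) (pvLabF es) := by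
  induction es using List.reverseRecOn with
  | nil =>
    refine ⟨rfl, ?_, ?_⟩
    · intro x lx hx
      rw [show (pvLabF []).get? x = none from rfl] at hx
      cases hx
    · intro x y lx ly hx hy
      rw [show (pvLabF []).get? x = none from rfl] at hx
      cases hx
  | append_singleton es e ih =>
    rw [pvLabF_append]
    exact pvGood_step es e (pvLabF es) ih

def pvLabAt (es : List (Int × Int)) (x : Int) : Int := ((pvLabF es).get? x).getD 0

def pvCost (c_lib c_road : Int) (M : List Int) : Int :=
  ((PySem.Set.ofList M).map (fun l => ((M.count l : Int) - 1) * c_road + c_lib)).sum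

lemma pvLabAt_some (es : List (Int × Int)) {x : Int} (hx : x ∈ pvConnF es) :
    (pvLabF es).get? x = some (pvLabAt es x) := by
  obtain ⟨hk, _, _⟩ := pvLabF_good es
  cases h : (pvLabF es).get? x with
  | none =>
    exact absurd (hk ▸ ((PySem.Dict.get?_eq_none_iff_not_mem_keys _ _).1 h)) (not_not_intro hx)
  | some lx => simp [pvLabAt, h]

lemma pvLabAt_iff (es : List (Int × Int)) {x y : Int}
    (hx : x ∈ pvConnF es) (hy : y ∈ pvConnF es) :
    pvReach es x y ↔ pvLabAt es x = pvLabAt es y := by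
  obtain ⟨_, _, hiff⟩ := pvLabF_good es
  exact hiff x y _ _ (pvLabAt_some es hx) (pvLabAt_some es hy)

lemma pvCost_step (c_lib c_road : Int) (lv : Int) (Mrest : List Int) :
    pvCost c_lib c_road (lv :: Mrest) =
      (((lv :: Mrest).count lv : Int) - 1) * c_road + c_lib +
        pvCost c_lib c_road (Mrest.filter (fun l => !(l == lv))) := by
  set M := lv :: Mrest with hM
  set M' := Mrest.filter (fun l => !(l == lv)) with hM'
  have hol : PySem.Set.ofList M = lv :: (PySem.Set.ofList Mrest).discard lv :=
    PySem.Set.ofList_cons lv Mrest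
  have hperm : ((PySem.Set.ofList Mrest).discard lv).Perm (PySem.Set.ofList M') := by
    rw [List.perm_ext_iff_of_nodup
      (PySem.Set.nodup_discard _ _ (PySem.Set.nodup_ofList _)) (PySem.Set.nodup_ofList _)]
    intro u
    rw [PySem.Set.mem_discard, PySem.Set.mem_ofList, PySem.Set.mem_ofList, hM',
      List.mem_filter]
    simp
  have hcnt : ∀ u ∈ PySem.Set.ofList M', M'.count u = M.count u := by
    intro u hu
    have hne : u ≠ lv := by
      rw [PySem.Set.mem_ofList, hM', List.mem_filter] at hu
      simpa using hu.2
    rw [hM', List.count_filter (by simpa using hne), hM, List.count_cons_of_ne hne.symm]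
  calc pvCost c_lib c_road M
      = ((M.count lv : Int) - 1) * c_road + c_lib +
        (((PySem.Set.ofList Mrest).discard lv).map
          (fun l => ((M.count l : Int) - 1) * c_road + c_lib)).sum := by
        rw [pvCost, hol, List.map_cons, List.sum_cons]
    _ = ((M.count lv : Int) - 1) * c_road + c_lib +
        ((PySem.Set.ofList M').map (fun l => ((M.count l : Int) - 1) * c_road + c_lib)).sum := by
        rw [(hperm.map _).sum_eq]
    _ = ((M.count lv : Int) - 1) * c_road + c_lib + pvCost c_lib c_road M' := by
        rw [pvCost]
        congr 1
        refine congrArg List.sum (List.map_congr_left ?_)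
        intro u hu
        rw [hcnt u hu]

lemma pvComponentLoop_spec (es : List (Int × Int)) (c_lib c_road : Int) :
    ∀ (fuel : Nat) (rem : PySem.Set Int) (total : Int),
      rem.Nodup →
      rem.length ≤ fuel →
      (∀ x ∈ rem, x ∈ pvConnF es) →
      (∀ x ∈ rem, ∀ y ∈ pvConnF es, pvReach es x y → y ∈ rem) →
      pvComponentLoop (pvGraphF es) c_lib c_road fuel rem total =
        total + pvCost c_lib c_road (rem.map (pvLabAt es)) := by
  intro fuel
  induction fuel with
  | zero =>
    intro rem total hnd hlen hsub hcl
    obtain rfl : rem = [] := List.eq_nil_of_length_eq_zero (Nat.le_zero.1 hlen)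
    simp [pvComponentLoop, pvCost, PySem.Set.ofList]
  | succ fuel ih =>
    intro rem total hnd hlen hsub hcl
    match rem with
    | [] => simp [pvComponentLoop, pvCost, PySem.Set.ofList]
    | v :: rest =>
      have hv : v ∈ pvConnF es := hsub v List.mem_cons_self
      obtain ⟨hndc, hmemc⟩ := pvDfs_spec es v
      set comp := pvDfs (pvGraphF es) v with hcomp
      set lab := pvLabAt es with hlab
      have hcomp_mem : ∀ x, x ∈ comp ↔ x ∈ v :: rest ∧ lab x = lab v := by
        intro x
        rw [hmemc x]
        constructor
        · intro h
          rcases pvReach_support h with rfl | ⟨_, hx2⟩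
          · exact ⟨List.mem_cons_self, rfl⟩
          · exact ⟨hcl v List.mem_cons_self x hx2 h,
              ((pvLabAt_iff es hv hx2).1 h).symm⟩
        · rintro ⟨hxr, hxl⟩
          exact pvReach_symm ((pvLabAt_iff es (hsub x hxr) hv).2 hxl)
      have hfil_nd : (List.filter (fun x => lab x == lab v) (v :: rest)).Nodup :=
        hnd.filter _
      have hperm : comp.Perm ((v :: rest).filter (fun x => lab x == lab v)) := by
        rw [List.perm_ext_iff_of_nodup hndc hfil_nd]
        intro x
        rw [hcomp_mem x, List.mem_filter]
        simp
      have hlen_comp : comp.length = ((v :: rest).map lab).count (lab v) := by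
        rw [hperm.length_eq, List.count, List.countP_map,
          ← List.countP_eq_length_filter]
        rfl
      have hdiff : PySem.Set.diff rest comp =
          rest.filter (fun x => !(lab x == lab v)) := by
        rw [PySem.Set.diff]
        refine List.filter_congr ?_
        intro x hx
        by_cases hl : lab x = lab v
        · have hxc : x ∈ comp := (hcomp_mem x).2 ⟨List.mem_cons_of_mem _ hx, hl⟩
          simp [hl, hxc]
        · have hxc : x ∉ comp := fun hc => hl ((hcomp_mem x).1 hc).2
          simp [hl, hxc]
      set rem' := rest.filter (fun x => !(lab x == lab v)) with hrem'
      have hstep : pvComponentLoop (pvGraphF es) c_lib c_road (fuel + 1) (v :: rest) total =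
          pvComponentLoop (pvGraphF es) c_lib c_road fuel (PySem.Set.diff rest comp)
            (total + (PySem.Set.len comp - 1) * c_road + c_lib) := rfl
      rw [hstep, hdiff]
      have hnd' : rem'.Nodup := (List.Nodup.of_cons hnd).filter _
      have hlen' : rem'.length ≤ fuel := by
        have h1 : rem'.length ≤ rest.length := List.length_filter_le _ _
        have h2 : rest.length + 1 ≤ fuel + 1 := by simpa using hlen
        omega
      have hsub' : ∀ x ∈ rem', x ∈ pvConnF es := fun x hx =>
        hsub x (List.mem_cons_of_mem _ (List.mem_of_mem_filter hx))
      have hcl' : ∀ x ∈ rem', ∀ y ∈ pvConnF es, pvReach es x y → y ∈ rem' := by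
        intro x hx y hy hxy
        have hxrem : x ∈ v :: rest := List.mem_cons_of_mem _ (List.mem_of_mem_filter hx)
        have hyrem : y ∈ v :: rest := hcl x hxrem y hy hxy
        have hlx : ¬ (lab x = lab v) := by
          have := List.of_mem_filter hx
          simpa using this
        have hlabeq : lab x = lab y := (pvLabAt_iff es (hsub x hxrem) hy).1 hxy
        have hly : ¬ (lab y = lab v) := fun h => hlx (hlabeq.trans h)
        have hyrest : y ∈ rest := by
          rcases List.mem_cons.1 hyrem with rfl | h
          · exact absurd rfl hly
          · exact h
        rw [hrem']
        exact List.mem_filter.2 ⟨hyrest, by simpa using hly⟩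
      rw [ih rem' _ hnd' hlen' hsub' hcl']
      have hmap' : rem'.map lab = (rest.map lab).filter (fun l => !(l == lab v)) := by
        rw [List.filter_map]
        rfl
      rw [List.map_cons, pvCost_step, ← hmap']
      have hlenInt : PySem.Set.len comp = ((((v :: rest).map lab).count (lab v) : Int)) := by
        rw [PySem.Set.len, hlen_comp]
      rw [hlenInt]
      rw [List.map_cons]
      ring

-- A counts the isolated cities as |{1..n} \ connected|; B counts the cities in range(1, n+1)
-- without a label. With keys = connected these agree.
lemma pvRange_shift (n : Int) :
    (PySem.List.pyRange 0 n 1).map (· + 1) = PySem.List.pyRange 1 (n + 1) 1 := by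
  rw [PySem.List.pyRange_one, PySem.List.pyRange_one]
  have h1 : (n - 0).toNat = (n + 1 - 1).toNat := by omega
  rw [List.map_map, ← h1]
  refine List.map_congr_left ?_
  intro k _
  simp [Function.comp]
  omega

lemma pvIso (n : Int) (label : PySem.Dict Int Int) :
    PySem.Set.len (PySem.Set.diff
        (PySem.Set.ofList ((PySem.List.pyRange 0 n 1).map (· + 1))) label.keys) =
      ((PySem.List.pyRange 1 (n + 1) 1).countP (fun city => !(label.contains city)) : Int) := by
  rw [pvRange_shift]
  have hnd : (PySem.List.pyRange 1 (n + 1) 1).Nodup := PySem.List.nodup_pyRange_one _ _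
  rw [PySem.Set.ofList_eq_self_of_nodup _ hnd, PySem.Set.diff, PySem.Set.len,
    List.countP_eq_length_filter]
  have hfil : (PySem.List.pyRange 1 (n + 1) 1).filter
      (fun x => !(PySem.Set.contains label.keys x)) =
      (PySem.List.pyRange 1 (n + 1) 1).filter (fun city => !(label.contains city)) := by
    refine List.filter_congr ?_
    intro x _
    have hc : label.contains x = PySem.Set.contains label.keys x := by
      rw [Bool.eq_iff_iff, PySem.Set.contains_iff]
      exact PySem.Dict.contains_iff_mem_keys _ _
    rw [hc]
  rw [hfil]

def pvEdges (cities : List (List Int)) : List (Int × Int) :=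
  cities.map (fun i => (PySem.List.pyGetD i 0 0, PySem.List.pyGetD i 1 0))

lemma pvFoldGraph (cities : List (List Int)) :
    cities.foldl (fun g i =>
      (g.modify (PySem.List.pyGetD i 0 0) PySem.Set.empty
          (fun s => PySem.Set.add s (PySem.List.pyGetD i 1 0))).modify
        (PySem.List.pyGetD i 1 0) PySem.Set.empty
          (fun s => PySem.Set.add s (PySem.List.pyGetD i 0 0))) PySem.Dict.empty =
      pvGraphF (pvEdges cities) := by
  rw [pvGraphF_eq_foldl, pvEdges, List.foldl_map]
  rfl

lemma pvFoldConn (cities : List (List Int)) :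
    cities.foldl (fun s i =>
      PySem.Set.add (PySem.Set.add s (PySem.List.pyGetD i 0 0)) (PySem.List.pyGetD i 1 0))
      PySem.Set.empty = pvConnF (pvEdges cities) := by
  rw [pvConnF, pvEdges, List.foldl_map]

lemma pvFoldLab (cities : List (List Int)) :
    cities.foldl (fun l road =>
      pvLabelStep l (PySem.List.pyGetD road 0 0) (PySem.List.pyGetD road 1 0))
      PySem.Dict.empty = pvLabF (pvEdges cities) := by
  rw [pvLabF, pvEdges, List.foldl_map]

lemma pvAltTotal (cities : List (List Int)) (c_lib c_road : Int) :
    ((PySem.Dict.counter (pvLabF (pvEdges cities)).values).values.map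
      (fun c => (c - 1) * c_road + c_lib)).sum =
      pvCost c_lib c_road ((pvConnF (pvEdges cities)).map (pvLabAt (pvEdges cities))) := by
  set es := pvEdges cities with hes
  have hkeys : (pvLabF es).keys = pvConnF es := (pvLabF_good es).1
  have hndk : (pvLabF es).keys.Nodup := hkeys ▸ pvNodup_pvConnF es
  have hvals : (pvLabF es).values = (pvConnF es).map (pvLabAt es) := by
    rw [PySem.Dict.values_eq_map_keys _ hndk 0, hkeys]
    rfl
  have hval_counter : (PySem.Dict.counter (pvLabF es).values).values =
      (PySem.Set.ofList (pvLabF es).values).map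
        (fun k => ((pvLabF es).values.count k : Int)) := by
    show (PySem.Dict.counter (pvLabF es).values).items.map (·.2) = _
    rw [PySem.Dict.items_counter, List.map_map]
    rfl
  rw [hval_counter, List.map_map, pvCost, ← hvals]
  rfl

theorem pvMain (n : Int) (c_lib : Int) (c_road : Int) (cities : List (List Int)) :
    roadsAndLibraries n c_lib c_road cities = roadsAndLibraries_alt n c_lib c_road cities := by
  rw [roadsAndLibraries, roadsAndLibraries_alt]
  by_cases hg : c_lib ≤ c_road ∨ cities = []
  · rw [if_pos hg, if_pos hg]
  · rw [if_neg hg, if_neg hg]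
    simp only [pvFoldGraph, pvFoldConn, pvFoldLab]
    set es := pvEdges cities with hes
    rw [pvComponentLoop_spec es c_lib c_road (pvConnF es).length (pvConnF es) 0
      (pvNodup_pvConnF es) le_rfl (fun x hx => hx) (fun x _ y hy _ => hy)]
    rw [pvAltTotal cities c_lib c_road]
    have hkeys : (pvLabF es).keys = pvConnF es := (pvLabF_good es).1
    rw [← hkeys, pvIso n (pvLabF es)]
    ring

-- ===== VERDICT (by name: the statement is the Claim_ definition above) =====
theorem roadsAndLibraries_spec : Claim_equal_roadsAndLibraries := by
  intro n c_lib c_road cities _ _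
  unfold Spec_roadsAndLibraries
  exact pvMain n c_lib c_road cities
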